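-- pv_equiv track=rewrite | github.com/AnjanB3012/warehouse-zip-locator | test5.py | minfinder
-- ===== SOURCE A (Python) =====
-- def minfinder(warehouselocs):
--     minfunlat=100000
--     minfunlon=100000
--     for i in range(0,len(warehouselocs)):
--         if warehouselocs[i][0]<minfunlat:
--             minfunlat=warehouselocs[i][0]
--     for j in range(0,len(warehouselocs)):
--         if warehouselocs[j][1]<minfunlon:
--             minfunlon=warehouselocs[j][1]
--     return minfunlat,minfunlon
-- ===== SOURCE B (Python) =====
-- def minfinder(warehouselocs):
--     minlat = 100000
--     minlon = 100000
--     for lat, lon in warehouselocs: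
--         minlat = min(minlat, lat)
--         minlon = min(minlon, lon)
--     return minlat, minlon
-- ===== Notes on version B (the rewrite author's own statement) =====
-- stated objective: simpler
-- what changed: Replaced A's two index-based passes (range(len), strict-< updates) with one direct iteration over the pairs that maintains both running minima via min(), keeping the 100000 sentinel start.
import Mathlib
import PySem

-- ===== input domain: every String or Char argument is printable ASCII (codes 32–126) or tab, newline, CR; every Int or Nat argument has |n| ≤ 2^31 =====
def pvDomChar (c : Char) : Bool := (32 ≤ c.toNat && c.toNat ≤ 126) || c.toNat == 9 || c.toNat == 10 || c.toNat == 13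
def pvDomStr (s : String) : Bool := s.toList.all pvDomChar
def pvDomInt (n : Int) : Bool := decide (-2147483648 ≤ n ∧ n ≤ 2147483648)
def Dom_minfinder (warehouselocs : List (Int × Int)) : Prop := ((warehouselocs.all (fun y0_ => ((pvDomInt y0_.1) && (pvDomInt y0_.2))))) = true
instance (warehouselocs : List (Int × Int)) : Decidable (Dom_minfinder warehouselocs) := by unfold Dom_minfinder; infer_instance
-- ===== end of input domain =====

-- B fuses A's two index-based passes into one direct iteration over the pairs using min(); same values, simpler.

-- ===== PORT A =====
-- two separate passes over range(0, len(warehouselocs)), indexing with pyGet? (never none here)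
def minfinder (warehouselocs : List (Int × Int)) : Int × Int :=
  let minfunlat :=
    (PySem.List.pyRange 0 warehouselocs.length 1).foldl
      (fun m i => match PySem.List.pyGet? warehouselocs i with
        | some p => if p.1 < m then p.1 else m
        | none => m) 100000
  let minfunlon :=
    (PySem.List.pyRange 0 warehouselocs.length 1).foldl
      (fun m j => match PySem.List.pyGet? warehouselocs j with
        | some p => if p.2 < m then p.2 else m
        | none => m) 100000
  (minfunlat, minfunlon)

-- ===== PORT B =====
-- one pass over the pairs, maintaining both running minima with min
def minfinder_alt (warehouselocs : List (Int × Int)) : Int × Int :=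
  warehouselocs.foldl (fun s p => (min s.1 p.1, min s.2 p.2)) (100000, 100000)

-- ===== PRECONDITION & SPEC =====
def Spec_minfinder (warehouselocs : List (Int × Int)) (out : Int × Int) : Prop := out = minfinder_alt warehouselocs
instance (warehouselocs : List (Int × Int)) (out : Int × Int) : Decidable (Spec_minfinder warehouselocs out) := by unfold Spec_minfinder; infer_instance

-- ===== CLAIM (what is proved, stated in full; the proofs are below) =====
def Claim_equal_minfinder : Prop := ∀ (warehouselocs : List (Int × Int)), Dom_minfinder warehouselocs → Spec_minfinder warehouselocs (minfinder warehouselocs)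

-- ===== LEMMAS AND PROOFS =====

-- one index pass of A, projected by f, equals a direct foldl of min over the list
theorem pass_eq (f : Int × Int → Int) (xs : List (Int × Int)) (m : Int) :
    (PySem.List.pyRange 0 xs.length 1).foldl
      (fun m i => match PySem.List.pyGet? xs i with
        | some p => if f p < m then f p else m
        | none => m) m
      = xs.foldl (fun m p => min m (f p)) m := by
  induction xs using List.reverseRecOn generalizing m with
  | nil => simp
  | append_singleton ys p ih =>
    have hlen : ((ys ++ [p]).length : Int) = (ys.length : Int) + 1 := by simp
    rw [hlen, PySem.List.pyRange_one_succ_right (by positivity)]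
    rw [List.foldl_append, List.foldl_append]
    have hinner :
        (PySem.List.pyRange 0 ys.length 1).foldl
          (fun m i => match PySem.List.pyGet? (ys ++ [p]) i with
            | some q => if f q < m then f q else m
            | none => m) m
          = ys.foldl (fun m q => min m (f q)) m := by
      have hcong := PySem.List.foldl_congr_mem (l := PySem.List.pyRange 0 (ys.length : Int) 1)
        (init := m)
        (f := fun m i => match PySem.List.pyGet? (ys ++ [p]) i with
          | some q => if f q < m then f q else m
          | none => m)
        (g := fun m i => match PySem.List.pyGet? ys i with
          | some q => if f q < m then f q else m
          | none => m)
        (by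
          intro acc x hx
          rw [PySem.List.mem_pyRange_one] at hx
          have ht : x.toNat < ys.length := by omega
          have hg : PySem.List.pyGet? (ys ++ [p]) x = PySem.List.pyGet? ys x := by
            rw [PySem.List.pyGet?_of_nonneg _ hx.1, PySem.List.pyGet?_of_nonneg _ hx.1,
              List.getElem?_append_left ht]
          simp only [hg])
      rw [hcong]
      exact ih m
    rw [hinner]
    simp only [List.foldl_cons, List.foldl_nil]
    rw [PySem.List.pyGet?_append_length]
    set M := ys.foldl (fun m q => min m (f q)) m with hM
    show (if f p < M then f p else M) = min M (f p)
    rcases le_or_gt M (f p) with h | h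
    · rw [if_neg (not_lt.mpr h), min_eq_left h]
    · rw [if_pos h, min_eq_right (le_of_lt h)]

-- the fused fold computes the pair of the two independent folds
theorem fused_eq (xs : List (Int × Int)) (a b : Int) :
    xs.foldl (fun s p => (min s.1 p.1, min s.2 p.2)) (a, b)
      = (xs.foldl (fun m p => min m p.1) a, xs.foldl (fun m p => min m p.2) b) := by
  induction xs generalizing a b with
  | nil => rfl
  | cons x xs ih => simp [List.foldl_cons, ih]

-- ===== VERDICT (by name: the statement is the Claim_ definition above) =====
theorem minfinder_spec : Claim_equal_minfinder := by
  intro xs _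
  unfold Spec_minfinder minfinder minfinder_alt
  rw [fused_eq, pass_eq (fun p => p.1), pass_eq (fun p => p.2)]
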